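-- pv_equiv track=rewrite | github.com/Pan-will/LeetCode | 公司真题/京东/键盘输入.py | getAns
-- ===== SOURCE A (Python) =====
-- def getAns(row, column, jianpan, move, zhuan, kit, tar):
--     res = 0
--     # 机械手初始位置
--     begin_i = 0
--     begin_j = 0
--     for ch in tar:
--         for i, cur_row in enumerate(jianpan):
--             if ch in cur_row:
--                 ch_index = cur_row.index(ch)
--                 res = res + (i-begin_i) + (ch_index-begin_j)
--     return res
-- ===== SOURCE B (Python) =====
-- def getAns(row, column, jianpan, move, zhuan, kit, tar):
--     # one pass over the grid, weighted by target-character frequency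
--     cnt = {}
--     for ch in tar:
--         cnt[ch] = cnt.get(ch, 0) + 1
--     res = 0
--     for i, cur_row in enumerate(jianpan):
--         seen = set()
--         for j, ch in enumerate(cur_row):
--             if ch not in seen:
--                 seen.add(ch)
--                 res += cnt.get(ch, 0) * (i + j)
--     return res
-- ===== Notes on version B (the rewrite author's own statement) =====
-- stated objective: faster
-- what changed: Instead of scanning the whole keyboard grid once per target character, B builds a frequency counter of the target once and makes a single pass over the grid, adding count(ch)*(i+j) at the first occurrence of each character per row.
import Mathlib
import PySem

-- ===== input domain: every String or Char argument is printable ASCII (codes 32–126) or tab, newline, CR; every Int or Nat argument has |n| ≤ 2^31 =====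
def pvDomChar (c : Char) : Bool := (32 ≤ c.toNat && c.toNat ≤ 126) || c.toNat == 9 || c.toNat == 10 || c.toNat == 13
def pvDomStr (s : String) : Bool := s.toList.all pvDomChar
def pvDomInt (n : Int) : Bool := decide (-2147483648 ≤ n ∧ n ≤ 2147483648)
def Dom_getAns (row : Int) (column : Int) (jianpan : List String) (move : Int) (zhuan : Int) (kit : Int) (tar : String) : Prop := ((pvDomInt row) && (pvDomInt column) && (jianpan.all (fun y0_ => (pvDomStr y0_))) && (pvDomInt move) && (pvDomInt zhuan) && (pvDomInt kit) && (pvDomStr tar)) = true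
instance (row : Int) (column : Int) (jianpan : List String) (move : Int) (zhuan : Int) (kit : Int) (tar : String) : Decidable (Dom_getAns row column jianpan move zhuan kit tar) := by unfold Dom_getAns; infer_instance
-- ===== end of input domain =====

-- B replaces A's per-target-character scan of the whole keyboard by a single grid pass
-- weighted by target-character frequency (objective: faster).

-- ===== PORT A =====
-- `ch in cur_row` with ch a single character is exact as list membership of that character;
-- `cur_row.index(ch)` is the first index = PySem.List.index?, a `some` under the membership guard.
def getAns (row : Int) (column : Int) (jianpan : List String) (move : Int) (zhuan : Int) (kit : Int) (tar : String) : Int :=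
  let begin_i : Int := 0
  let begin_j : Int := 0
  tar.toList.foldl (fun res ch =>
    (PySem.List.enumerate jianpan 0).foldl (fun res p =>
      if p.2.toList.contains ch then
        res + (p.1 - begin_i) + (((PySem.List.index? p.2.toList ch).getD 0 : Int) - begin_j)
      else res) res) 0

-- ===== PORT B =====
def getAns_alt (row : Int) (column : Int) (jianpan : List String) (move : Int) (zhuan : Int) (kit : Int) (tar : String) : Int :=
  let cnt : PySem.Dict Char Int :=
    tar.toList.foldl (fun d ch => d.insert ch (d.getD ch 0 + 1)) PySem.Dict.empty
  (PySem.List.enumerate jianpan 0).foldl (fun res p =>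
    ((PySem.List.enumerate p.2.toList 0).foldl
      (fun (st : Int × PySem.Set Char) q =>
        if st.2.contains q.2 then st
        else (st.1 + cnt.getD q.2 0 * (p.1 + q.1), st.2.add q.2))
      (res, PySem.Set.empty)).1) 0

-- ===== PRECONDITION & SPEC =====
def Spec_getAns (row : Int) (column : Int) (jianpan : List String) (move : Int) (zhuan : Int) (kit : Int) (tar : String) (out : Int) : Prop := out = getAns_alt row column jianpan move zhuan kit tar
instance (row : Int) (column : Int) (jianpan : List String) (move : Int) (zhuan : Int) (kit : Int) (tar : String) (out : Int) : Decidable (Spec_getAns row column jianpan move zhuan kit tar out) := by unfold Spec_getAns; infer_instance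

-- ===== CLAIM (what is proved, stated in full; the proofs are below) =====
def Claim_equal_getAns : Prop := ∀ (row : Int) (column : Int) (jianpan : List String) (move : Int) (zhuan : Int) (kit : Int) (tar : String), Dom_getAns row column jianpan move zhuan kit tar → Spec_getAns row column jianpan move zhuan kit tar (getAns row column jianpan move zhuan kit tar)

-- ===== LEMMAS AND PROOFS =====

-- contribution of one target character ch for the row with body cs at grid row index i
def pvContrib (i : Int) (cs : List Char) (ch : Char) : Int :=
  if ch ∈ cs then i + ((PySem.List.index? cs ch).getD 0 : Int) else 0

theorem pvInnerA (ch : Char) (rows : List (Int × String)) (res : Int) :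
    rows.foldl (fun res p =>
      if p.2.toList.contains ch then
        res + (p.1 - 0) + (((PySem.List.index? p.2.toList ch).getD 0 : Int) - 0)
      else res) res
    = res + (rows.map (fun p => pvContrib p.1 p.2.toList ch)).sum := by
  have : (fun (res : Int) (p : Int × String) =>
      if p.2.toList.contains ch then
        res + (p.1 - 0) + (((PySem.List.index? p.2.toList ch).getD 0 : Int) - 0)
      else res) = fun res p => res + pvContrib p.1 p.2.toList ch := by
    funext res p
    by_cases h : ch ∈ p.2.toList <;> simp [pvContrib, h] <;> ring
  rw [this, PySem.List.foldl_add]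

theorem pvA_eq (row column : Int) (jianpan : List String) (move zhuan kit : Int) (tar : String) :
    getAns row column jianpan move zhuan kit tar
    = (tar.toList.map (fun ch =>
        ((PySem.List.enumerate jianpan 0).map (fun p => pvContrib p.1 p.2.toList ch)).sum)).sum := by
  unfold getAns
  have : (fun (res : Int) (ch : Char) =>
      (PySem.List.enumerate jianpan 0).foldl (fun res p =>
        if p.2.toList.contains ch then
          res + (p.1 - 0) + (((PySem.List.index? p.2.toList ch).getD 0 : Int) - 0)
        else res) res)
      = fun res ch => res + ((PySem.List.enumerate jianpan 0).map (fun p => pvContrib p.1 p.2.toList ch)).sum := by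
    funext res ch; exact pvInnerA ch _ res
  simp only [this, PySem.List.foldl_add, zero_add]

theorem pvSumSplit (t : List Char) (c : Char) (a : Int) (g : Char → Int) (hg : g c = 0) :
    (t.map (fun ch => if ch = c then a else g ch)).sum
    = (t.count c : Int) * a + (t.map g).sum := by
  induction t with
  | nil => simp
  | cons x t ih =>
    by_cases h : x = c
    · subst h
      simp [List.count_cons, ih, hg]
      push_cast
      ring
    · simp [List.count_cons, h, ih]
      ring

theorem pvIdxShift (c ch : Char) (cs : List Char) (hch : ch ≠ c) (hmem : ch ∈ cs) :
    ((PySem.List.index? (c :: cs) ch).getD 0 : Int) = ((PySem.List.index? cs ch).getD 0 : Int) + 1 := by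
  have hsome : (PySem.List.index? cs ch).isSome = true :=
    (PySem.List.index?_isSome_iff cs ch).mpr hmem
  obtain ⟨k, hk⟩ := Option.isSome_iff_exists.mp hsome
  rw [PySem.List.index?_cons_of_ne (x := c) (v := ch) cs (Ne.symm hch), hk]
  simp

theorem pvInnerB (w : Char → Int) (t : List Char) (hw : ∀ c, w c = (t.count c : Int))
    (i : Int) (cs : List Char) : ∀ (j0 res : Int) (seen : PySem.Set Char),
    ((PySem.List.enumerate cs j0).foldl
      (fun (st : Int × PySem.Set Char) q =>
        if st.2.contains q.2 then st
        else (st.1 + w q.2 * (i + q.1), st.2.add q.2)) (res, seen)).1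
    = res + (t.map (fun ch =>
        if ch ∉ seen ∧ ch ∈ cs then i + j0 + ((PySem.List.index? cs ch).getD 0 : Int) else 0)).sum := by
  induction cs with
  | nil =>
    intro j0 res seen
    simp [PySem.List.enumerate]
  | cons c cs ih =>
    intro j0 res seen
    rw [PySem.List.enumerate_cons, List.foldl_cons]
    by_cases h : c ∈ seen
    · have hc : seen.contains c = true := by
        simpa [PySem.Set.contains_eq_decide] using h
      simp only [hc, if_true, ih]
      refine congrArg (res + ·) (congrArg List.sum (List.map_congr_left ?_))
      intro ch _
      by_cases hch : ch = c
      · subst hch; simp [h]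
      · by_cases hmem : ch ∈ cs
        · rw [pvIdxShift c ch cs hch hmem]
          by_cases hs : ch ∈ seen <;> simp [hch, hmem, hs] <;> ring
        · simp [hch, hmem]
    · have hc : seen.contains c = false := by
        simpa [PySem.Set.contains_eq_decide] using h
      simp only [hc, Bool.false_eq_true, if_false, ih]
      have hstep : (t.map (fun ch =>
          if ch ∉ seen ∧ ch ∈ c :: cs then i + j0 + ((PySem.List.index? (c :: cs) ch).getD 0 : Int) else 0)).sum
          = (t.count c : Int) * (i + j0)
            + (t.map (fun ch =>
                if ch ∉ seen.add c ∧ ch ∈ cs then i + (j0 + 1) + ((PySem.List.index? cs ch).getD 0 : Int) else 0)).sum := by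
        have hpt : (fun ch =>
            if ch ∉ seen ∧ ch ∈ c :: cs then i + j0 + ((PySem.List.index? (c :: cs) ch).getD 0 : Int) else 0)
            = fun ch => if ch = c then (i + j0)
                else (if ch ∉ seen.add c ∧ ch ∈ cs then i + (j0 + 1) + ((PySem.List.index? cs ch).getD 0 : Int) else 0) := by
          funext ch
          by_cases hch : ch = c
          · subst hch
            rw [PySem.List.index?_cons_self]
            simp [h]
          · have hadd : (ch ∈ seen.add c) ↔ ch ∈ seen := by
              rw [PySem.Set.mem_add]
              simp [hch]
            by_cases hmem : ch ∈ cs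
            · rw [pvIdxShift c ch cs hch hmem]
              by_cases hs : ch ∈ seen <;> simp [hch, hmem, hadd, hs] <;> ring
            · simp [hch, hmem, hadd]
        rw [hpt, pvSumSplit]
        have : (c ∈ PySem.Set.add seen c) := by rw [PySem.Set.mem_add]; right; rfl
        simp [this]
      rw [hstep, hw]
      ring

theorem pvRowB (w : Char → Int) (t : List Char) (hw : ∀ c, w c = (t.count c : Int))
    (i : Int) (cs : List Char) (res : Int) :
    ((PySem.List.enumerate cs 0).foldl
      (fun (st : Int × PySem.Set Char) q =>
        if st.2.contains q.2 then st
        else (st.1 + w q.2 * (i + q.1), st.2.add q.2)) (res, PySem.Set.empty)).1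
    = res + (t.map (pvContrib i cs)).sum := by
  rw [pvInnerB w t hw i cs 0 res PySem.Set.empty]
  refine congrArg (res + ·) (congrArg List.sum (List.map_congr_left ?_))
  intro ch _
  simp [pvContrib, PySem.Set.empty]

theorem pvB_eq (row column : Int) (jianpan : List String) (move zhuan kit : Int) (tar : String) :
    getAns_alt row column jianpan move zhuan kit tar
    = ((PySem.List.enumerate jianpan 0).map (fun p =>
        (tar.toList.map (pvContrib p.1 p.2.toList)).sum)).sum := by
  unfold getAns_alt
  have hw : ∀ c : Char,
      (tar.toList.foldl (fun d ch => d.insert ch (d.getD ch 0 + 1)) PySem.Dict.empty).getD c 0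
      = (tar.toList.count c : Int) := by
    intro c
    rw [PySem.Dict.getD_foldl_insert_add_one]
    simp [PySem.Dict.getD_empty]
  have : (fun (res : Int) (p : Int × String) =>
      ((PySem.List.enumerate p.2.toList 0).foldl
        (fun (st : Int × PySem.Set Char) q =>
          if st.2.contains q.2 then st
          else (st.1 + (tar.toList.foldl (fun d ch => d.insert ch (d.getD ch 0 + 1)) PySem.Dict.empty).getD q.2 0 * (p.1 + q.1), st.2.add q.2))
        (res, PySem.Set.empty)).1)
      = fun res p => res + (tar.toList.map (pvContrib p.1 p.2.toList)).sum := by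
    funext res p
    exact pvRowB _ tar.toList hw p.1 p.2.toList res
  simp only [this, PySem.List.foldl_add, zero_add]

theorem pvSumComm (xs : List (Int × String)) (t : List Char) (F : (Int × String) → Char → Int) :
    (t.map (fun ch => (xs.map (fun p => F p ch)).sum)).sum
    = (xs.map (fun p => (t.map (F p)).sum)).sum := by
  induction xs with
  | nil => simp
  | cons x xs ih =>
    simp only [List.map_cons, List.sum_cons, ← ih, ← PySem.List.sum_map_add_int]

-- ===== VERDICT (by name: the statement is the Claim_ definition above) =====
theorem getAns_spec : Claim_equal_getAns := by
  intro row column jianpan move zhuan kit tar _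
  unfold Spec_getAns
  rw [pvA_eq, pvB_eq, pvSumComm]
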